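-- pv_equiv track=rewrite | github.com/papibe/advent-of-code-2016 | python/day16/part2_slow.py | solve
-- ===== SOURCE A (Python) =====
-- from typing import Deque, Dict, List, Match, Optional, Set, Tuple, Iterable
--
-- def solve(puzzle_input: str, length: int) -> int:
--
--     a: List[str] = list(puzzle_input)
--
--     counter: int = 0
--     while len(a) < length:
--         a_reversed: Iterable[str] = reversed(a)
--         a.append("0")
--         counter += 1
--         for char in a_reversed:
--             if char == "1":
--                 a.append("0")
--             else:
--                 a.append("1")
--
--     return a[:length]
-- ===== SOURCE B (Python) =====
-- def solve(puzzle_input: str, length: int):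
--     # Per-index closed form over the block+separator structure of the dragon string.
--     L = len(puzzle_input)
--     if length <= L:
--         return list(puzzle_input)[:length]
--     unit = L + 1
--     out = []
--     for i in range(length):
--         j, off = divmod(i, unit)
--         if off < L:
--             if j == 0:
--                 out.append(puzzle_input[off])
--             elif j % 2 == 1:
--                 out.append("0" if puzzle_input[L - 1 - off] == "1" else "1")
--             else:
--                 out.append("1" if puzzle_input[off] == "1" else "0")
--         else:
--             n = j + 1
--             while n % 2 == 0:
--                 n //= 2
--             out.append("1" if n % 4 == 3 else "0")
--     return out
-- ===== Notes on version B (the rewrite author's own statement) =====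
-- stated objective: alternative
-- what changed: Replaced A's repeated whole-string dragon-curve doubling (append '0' plus reversed complement until long enough, then truncate) by a single pass that computes each output character directly from its index via the block+separator decomposition: characters inside a block come from the seed (or its projection/reverse-complement by block parity) and separator characters are the paperfolding bits computed by stripping factors of 2.
import Mathlib
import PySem

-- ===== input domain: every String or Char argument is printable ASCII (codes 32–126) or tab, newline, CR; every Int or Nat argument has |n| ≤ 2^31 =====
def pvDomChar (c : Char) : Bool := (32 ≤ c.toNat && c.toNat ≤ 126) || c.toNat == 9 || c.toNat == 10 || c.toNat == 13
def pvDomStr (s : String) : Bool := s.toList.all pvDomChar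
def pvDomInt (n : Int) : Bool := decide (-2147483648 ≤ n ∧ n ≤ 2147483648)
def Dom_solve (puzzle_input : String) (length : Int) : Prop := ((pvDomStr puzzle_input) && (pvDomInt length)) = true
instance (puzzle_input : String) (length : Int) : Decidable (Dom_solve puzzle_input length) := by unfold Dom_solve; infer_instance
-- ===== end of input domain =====

-- B replaces A's geometric string doubling by a per-index closed form over the
-- block+separator structure of the dragon string (alternative algorithm, same cost).

-- ===== PORT A =====
-- the while loop of A: grow `a` by one dragon step until len(a) >= length
def solveLoop (length : Int) (a : List String) : List String :=
  if _h : (a.length : Int) < length then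
    -- a_reversed = reversed(a); a.append("0"); for char in a_reversed: append complement
    solveLoop length
      (a.reverse.foldl (fun acc char => acc ++ [if char = "1" then "0" else "1"]) (a ++ ["0"]))
  else a
termination_by (length - (a.length : Int)).toNat
decreasing_by
  simp only [PySem.List.foldl_append_singleton_eq_map, List.length_append, List.length_map,
    List.length_reverse, List.length_cons, List.length_nil]
  omega

def solve (puzzle_input : String) (length : Int) : List String :=
  PySem.List.slice (solveLoop length ((puzzle_input.toList).map (fun c => String.ofList [c])))
    none (some length)

-- ===== PORT B =====
-- strip factors of 2 (the `while n % 2 == 0` loop of B); the 0-guard only makes it total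
def pvStrip2 (n : Nat) : Nat :=
  if _h : n % 2 = 0 ∧ 0 < n then pvStrip2 (n / 2) else n
termination_by n
decreasing_by omega

-- one output character: block j = i // (L+1), offset off = i % (L+1)
-- (the getD accesses are in range: off < L resp. L - 1 - off < L in their branches)
def bChar (s : List Char) (i : Nat) : String :=
  if i % (s.length + 1) < s.length then
    if i / (s.length + 1) = 0 then String.ofList [s.getD (i % (s.length + 1)) ' ']
    else if (i / (s.length + 1)) % 2 = 1 then
      (if s.getD (s.length - 1 - i % (s.length + 1)) ' ' = '1' then "0" else "1")
    else
      (if s.getD (i % (s.length + 1)) ' ' = '1' then "1" else "0")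
  else
    if pvStrip2 (i / (s.length + 1) + 1) % 4 = 3 then "1" else "0"

def solve_alt (puzzle_input : String) (length : Int) : List String :=
  if length ≤ (puzzle_input.toList.length : Int) then
    PySem.List.slice (puzzle_input.toList.map (fun c => String.ofList [c])) none (some length)
  else
    (List.range length.toNat).map (bChar puzzle_input.toList)

-- ===== PRECONDITION & SPEC =====
def Spec_solve (puzzle_input : String) (length : Int) (out : List String) : Prop := out = solve_alt puzzle_input length
instance (puzzle_input : String) (length : Int) (out : List String) : Decidable (Spec_solve puzzle_input length out) := by unfold Spec_solve; infer_instance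

-- ===== CLAIM (what is proved, stated in full; the proofs are below) =====
def Claim_equal_solve : Prop := ∀ (puzzle_input : String) (length : Int), Dom_solve puzzle_input length → Spec_solve puzzle_input length (solve puzzle_input length)

-- ===== LEMMAS AND PROOFS =====

-- the complement A appends: '0' for '1', '1' for everything else
def cs (c : String) : String := if c = "1" then "0" else "1"

lemma strip2_odd (n : Nat) (h : n % 2 = 1) : pvStrip2 n = n := by
  unfold pvStrip2; rw [dif_neg]; omega

lemma strip2_double (n : Nat) (h : 0 < n) : pvStrip2 (2 * n) = pvStrip2 n := by
  rw [pvStrip2, dif_pos (by omega)]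
  congr 1; omega

lemma strip2_odd_res : ∀ n : Nat, 0 < n → pvStrip2 n % 2 = 1 := by
  intro n
  induction n using Nat.strong_induction_on with
  | _ n ih =>
    intro h
    rw [pvStrip2]
    split
    · rename_i hc
      exact ih (n / 2) (by omega) (by omega)
    · omega

lemma strip2_pow2 (k : Nat) : pvStrip2 (2 ^ k) = 1 := by
  induction k with
  | zero => simp [pvStrip2]
  | succ k ih =>
    have h : (2 : Nat) ^ (k + 1) = 2 * 2 ^ k := by ring
    rw [h, strip2_double _ (Nat.two_pow_pos k), ih]

-- paperfolding reflection: around position 2^k the dragon bits are complementary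
lemma dragon_refl : ∀ m : Nat, ∀ k : Nat, 1 ≤ m → m < 2 ^ k →
    pvStrip2 (2 ^ k + m) % 4 + pvStrip2 (2 ^ k - m) % 4 = 4 := by
  intro m
  induction m using Nat.strong_induction_on with
  | _ m ih =>
    intro k h1 h2
    cases k with
    | zero => simp at h2; omega
    | succ K =>
      have e2 : (2 : Nat) ^ (K + 1) = 2 * 2 ^ K := by ring
      have hp : 1 ≤ (2 : Nat) ^ K := Nat.one_le_two_pow
      by_cases hm : m % 2 = 1
      · rw [strip2_odd (2 ^ (K + 1) + m) (by omega), strip2_odd (2 ^ (K + 1) - m) (by omega)]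
        cases K with
        | zero =>
          have hm1 : m = 1 := by norm_num at h2; omega
          subst hm1; norm_num
        | succ KK =>
          have e4 : (2 : Nat) ^ (KK + 2) = 4 * 2 ^ KK := by ring
          rw [e4] at h2 ⊢
          omega
      · have hm2 : 2 ≤ m := by omega
        have f1 : 2 ^ (K + 1) + m = 2 * (2 ^ K + m / 2) := by omega
        have f2 : 2 ^ (K + 1) - m = 2 * (2 ^ K - m / 2) := by omega
        rw [f1, f2, strip2_double _ (by omega), strip2_double _ (by omega)]
        exact ih (m / 2) (by omega) K (by omega) (by omega)

-- bChar at an index written as block*unit + offset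
def blockChar (s : List Char) (j off : Nat) : String :=
  if off < s.length then
    if j = 0 then String.ofList [s.getD off ' ']
    else if j % 2 = 1 then (if s.getD (s.length - 1 - off) ' ' = '1' then "0" else "1")
    else (if s.getD off ' ' = '1' then "1" else "0")
  else
    if pvStrip2 (j + 1) % 4 = 3 then "1" else "0"

lemma bChar_at (s : List Char) (j off n : Nat) (hn : n = (s.length + 1) * j + off)
    (hoff : off < s.length + 1) : bChar s n = blockChar s j off := by
  subst hn
  unfold bChar blockChar
  rw [Nat.mul_add_div (by omega), Nat.div_eq_of_lt hoff,
    Nat.mul_add_mod, Nat.mod_eq_of_lt hoff]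
  simp

lemma mk_eq_one (c : Char) : (String.ofList [c] = "1") ↔ c = '1' := by
  constructor
  · intro h
    have := congrArg String.toList h
    rw [String.toList_ofList] at this
    simpa using this
  · intro h; subst h; rfl

-- reflection of the whole sequence around the separator at position (L+1)*2^k - 1
lemma bChar_refl (s : List Char) (k i : Nat) (hi : i < (s.length + 1) * 2 ^ k - 1) :
    bChar s ((s.length + 1) * 2 ^ k + i) = cs (bChar s ((s.length + 1) * 2 ^ k - 2 - i)) := by
  obtain ⟨j, off, hofflt, hdm⟩ : ∃ j off, off < s.length + 1 ∧ (s.length + 1) * j + off = i :=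
    ⟨i / (s.length + 1), i % (s.length + 1), Nat.mod_lt _ (by omega),
      Nat.div_add_mod i (s.length + 1)⟩
  have hP : 1 ≤ 2 ^ k := Nat.one_le_two_pow
  have hmul1 : (s.length + 1) * (j + 1) = (s.length + 1) * j + (s.length + 1) :=
    Nat.mul_succ (s.length + 1) j
  have hjlt : j < 2 ^ k :=
    Nat.lt_of_mul_lt_mul_left (a := s.length + 1)
      (show (s.length + 1) * j < (s.length + 1) * 2 ^ k by omega)
  obtain ⟨d, hsum⟩ : ∃ d, j + 1 + d = 2 ^ k := ⟨2 ^ k - 1 - j, by omega⟩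
  have hPm : (s.length + 1) * 2 ^ k
      = (s.length + 1) * j + (s.length + 1) * d + (s.length + 1) := by rw [← hsum]; ring
  have hjd : (s.length + 1) * (2 ^ k + j) = (s.length + 1) * 2 ^ k + (s.length + 1) * j := by ring
  by_cases hoff : off < s.length
  · -- character position inside a block
    rw [bChar_at s (2 ^ k + j) off ((s.length + 1) * 2 ^ k + i) (by omega) (by omega),
      bChar_at s d (s.length - 1 - off) ((s.length + 1) * 2 ^ k - 2 - i) (by omega) (by omega)]
    unfold blockChar
    rw [if_pos hoff, if_pos (show s.length - 1 - off < s.length by omega)]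
    have hLL : s.length - 1 - (s.length - 1 - off) = off := by omega
    by_cases hd0 : d = 0
    · -- mirror block is the seed itself; our block is odd
      rw [if_pos hd0]
      have hodd : (2 ^ k + j) % 2 = 1 := by omega
      rw [if_neg (show ¬ 2 ^ k + j = 0 by omega), if_pos hodd]
      unfold cs
      by_cases hc : s.getD (s.length - 1 - off) ' ' = '1'
      · rw [if_pos hc, if_pos ((mk_eq_one _).mpr hc)]
      · rw [if_neg hc, if_neg (fun hh => hc ((mk_eq_one _).mp hh))]
    · have hpar : (2 ^ k + j) % 2 + d % 2 = 1 := by omega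
      by_cases hdp : d % 2 = 1
      · -- mirror block odd, so our block even (and nonzero)
        rw [if_neg hd0, if_pos hdp, hLL]
        rw [if_neg (show ¬ 2 ^ k + j = 0 by omega),
          if_neg (show ¬ (2 ^ k + j) % 2 = 1 by omega)]
        unfold cs
        by_cases hc : s.getD off ' ' = '1'
        · rw [if_pos hc, if_pos hc]; rfl
        · rw [if_neg hc, if_neg hc]; rfl
      · -- mirror block even nonzero, so our block odd
        rw [if_neg hd0, if_neg hdp]
        rw [if_neg (show ¬ 2 ^ k + j = 0 by omega),
          if_pos (show (2 ^ k + j) % 2 = 1 by omega)]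
        unfold cs
        by_cases hc : s.getD (s.length - 1 - off) ' ' = '1'
        · rw [if_pos hc, if_pos hc]; rfl
        · rw [if_neg hc, if_neg hc]; rfl
  · -- separator position
    have hoffL : off = s.length := by omega
    have hdge : 1 ≤ d := by
      have h1 : (s.length + 1) * (j + 1) < (s.length + 1) * 2 ^ k := by omega
      have h2 := Nat.lt_of_mul_lt_mul_left h1
      omega
    have hmd : (s.length + 1) * d = (s.length + 1) * (d - 1) + (s.length + 1) := by
      rw [← Nat.mul_succ]; congr 1; omega
    rw [bChar_at s (2 ^ k + j) s.length ((s.length + 1) * 2 ^ k + i) (by omega) (by omega),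
      bChar_at s (d - 1) s.length ((s.length + 1) * 2 ^ k - 2 - i) (by omega) (by omega)]
    unfold blockChar
    rw [if_neg (show ¬ s.length < s.length by omega), if_neg (show ¬ s.length < s.length by omega)]
    have hm1 : 2 ^ k + j + 1 = 2 ^ k + (j + 1) := by omega
    have hm2 : d - 1 + 1 = 2 ^ k - (j + 1) := by omega
    rw [hm1, hm2]
    have hrefl := dragon_refl (j + 1) k (by omega) (by omega)
    have ho1 := strip2_odd_res (2 ^ k + (j + 1)) (by omega)
    have ho2 := strip2_odd_res (2 ^ k - (j + 1)) (by omega)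
    have hb1 : pvStrip2 (2 ^ k + (j + 1)) % 4 < 4 := by omega
    unfold cs
    by_cases hc : pvStrip2 (2 ^ k - (j + 1)) % 4 = 3
    · rw [if_pos hc, if_neg (show ¬ pvStrip2 (2 ^ k + (j + 1)) % 4 = 3 by omega)]
      rfl
    · rw [if_neg hc, if_pos (show pvStrip2 (2 ^ k + (j + 1)) % 4 = 3 by omega)]
      rfl

lemma range_reverse_map (n : Nat) :
    (List.range n).reverse = (List.range n).map (fun i => n - 1 - i) := by
  apply List.ext_getElem (by simp)
  intro i h1 h2
  simp [List.getElem_reverse]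

-- one dragon step on the closed form
lemma step_eq (s : List Char) (k : Nat) :
    List.map (bChar s) (List.range ((s.length + 1) * 2 ^ (k + 1) - 1))
      = List.map (bChar s) (List.range ((s.length + 1) * 2 ^ k - 1)) ++ ["0"]
        ++ ((List.map (bChar s) (List.range ((s.length + 1) * 2 ^ k - 1))).reverse.map cs) := by
  have hP : 1 ≤ 2 ^ k := Nat.one_le_two_pow
  have h2 : (s.length + 1) * 2 ^ (k + 1) = 2 * ((s.length + 1) * 2 ^ k) := by ring
  have hn1 : 0 < (s.length + 1) * 2 ^ k := Nat.mul_pos (by omega) (by omega)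
  obtain ⟨n, hn⟩ : ∃ n, n = (s.length + 1) * 2 ^ k - 1 := ⟨_, rfl⟩
  rw [← hn]
  have hsplit : (s.length + 1) * 2 ^ (k + 1) - 1 = (n + 1) + n := by omega
  rw [hsplit, List.range_add, List.map_append, List.range_succ, List.map_append]
  have hlast : bChar s n = "0" := by
    have hmu : (s.length + 1) * 2 ^ k = (s.length + 1) * (2 ^ k - 1) + (s.length + 1) := by
      rw [← Nat.mul_succ]; congr 1; omega
    rw [bChar_at s (2 ^ k - 1) s.length n (by omega) (by omega)]
    unfold blockChar
    rw [if_neg (show ¬ s.length < s.length by omega)]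
    have he : 2 ^ k - 1 + 1 = 2 ^ k := by omega
    rw [he, strip2_pow2]
    norm_num
  have hmid : List.map (bChar s) ((List.range n).map (fun i => n + 1 + i))
      = (List.map (bChar s) (List.range n)).reverse.map cs := by
    rw [← List.map_reverse, range_reverse_map, List.map_map, List.map_map, List.map_map]
    apply List.map_congr_left
    intro i hi
    rw [List.mem_range] at hi
    simp only [Function.comp]
    have e1 : n + 1 + i = (s.length + 1) * 2 ^ k + i := by omega
    have e2 : n - 1 - i = (s.length + 1) * 2 ^ k - 2 - i := by omega
    rw [e1, e2, bChar_refl s k i (by omega)]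
  simp only [List.map_singleton]
  rw [hlast, hmid]

-- the initial list `list(puzzle_input)` is the closed form at k = 0
lemma base_eq (s : List Char) :
    s.map (fun c => String.ofList [c]) = List.map (bChar s) (List.range ((s.length + 1) * 2 ^ 0 - 1)) := by
  have h : (s.length + 1) * 2 ^ 0 - 1 = s.length := by omega
  rw [h]
  apply List.ext_getElem (by simp)
  intro i h1 h2
  simp only [List.getElem_map, List.getElem_range]
  rw [bChar_at s 0 i i (by omega) (by simp at h2; omega)]
  unfold blockChar
  rw [if_pos (by simp at h2; omega), if_pos rfl,
    List.getD_eq_getElem s ' ' (by simp at h2; omega)]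

-- the complement appended in A's for-loop is `cs`
lemma fold_cs (a b : List String) :
    b.foldl (fun acc char => acc ++ [if char = "1" then "0" else "1"]) a = a ++ b.map cs := by
  rw [PySem.List.foldl_append_singleton_eq_map]
  rfl

-- the while loop, started on the closed form, ends on the closed form
lemma loop_eq (s : List Char) (length : Int) : ∀ t k : Nat,
    (length - (((s.length + 1) * 2 ^ k - 1 : Nat) : Int)).toNat ≤ t →
    ∃ n : Nat, length ≤ (n : Int) ∧
      solveLoop length (List.map (bChar s) (List.range ((s.length + 1) * 2 ^ k - 1)))
        = List.map (bChar s) (List.range n) := by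
  intro t
  induction t with
  | zero =>
    intro k ht
    refine ⟨(s.length + 1) * 2 ^ k - 1, by omega, ?_⟩
    rw [solveLoop, dif_neg (by simp only [List.length_map, List.length_range]; omega)]
  | succ t ih =>
    intro k ht
    by_cases h : ((((s.length + 1) * 2 ^ k - 1 : Nat)) : Int) < length
    · have hP : 1 ≤ 2 ^ k := Nat.one_le_two_pow
      have h2 : (s.length + 1) * 2 ^ (k + 1) = 2 * ((s.length + 1) * 2 ^ k) := by ring
      have hn1 : 0 < (s.length + 1) * 2 ^ k := Nat.mul_pos (by omega) (by omega)
      rw [solveLoop, dif_pos (by simp only [List.length_map, List.length_range]; omega)]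
      rw [fold_cs, ← step_eq s k]
      exact ih (k + 1) (by omega)
    · refine ⟨(s.length + 1) * 2 ^ k - 1, by omega, ?_⟩
      rw [solveLoop, dif_neg (by simp only [List.length_map, List.length_range]; omega)]

-- ===== VERDICT (by name: the statement is the Claim_ definition above) =====
theorem solve_spec : Claim_equal_solve := by
  intro p length _dom
  unfold Spec_solve solve solve_alt
  by_cases hlen : length ≤ (p.toList.length : Int)
  · rw [if_pos hlen, solveLoop,
      dif_neg (by simp only [List.length_map]; omega)]
  · rw [if_neg hlen]
    rw [base_eq p.toList]
    obtain ⟨n, hn, hres⟩ := loop_eq p.toList length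
      ((length - (((p.toList.length + 1) * 2 ^ 0 - 1 : Nat) : Int)).toNat) 0 (le_refl _)
    rw [hres, PySem.List.slice_to _ (by omega)]
    rw [← List.map_take, List.take_range]
    congr 2
    omega
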